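-- pv_equiv track=rewrite | github.com/claranet/cloud-deploy-flask-ui | forms/form_aws_helper.py | safe_deployment_possibilities
-- ===== SOURCE A (Python) =====
-- def safe_deployment_possibilities(hosts_list):
--     """ Return a dict with split types as key and string as value
--         which describes the number of instances per deployment group.
--
--         :param  hosts_list  list:  A list of instances IPs.
--         :return  dict
--     """
--     split_types = ['1by1', '1/3', '25%', '50%']
--     msg = 'Number of instances per deployment group:'
--     possibilities = {}
--     for split_type in split_types:
--         if split_type == '1by1' and len(hosts_list) > 1:
--             groups_one = ['Group' + str(i[0] + 1) + ' : 1 |' for i in enumerate(hosts_list)]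
--             if len(groups_one) > 5:
--                 groups_one = groups_one[0:5] + ['.....']
--             possibilities['1by1'] = '{0} | {1} '.format(msg, str(' '.join(groups_one))[:-2])
--         elif split_type == '1/3' and len(hosts_list) > 2:
--             split_list = [hosts_list[i::3] for i in range(3)]
--             possibilities['1/3'] = '{0} | Group1 : {1} | Group2 : {2} | Group3 : {3}'.format(msg, len(split_list[0]),
--                                                                                              len(split_list[1]),
--                                                                                              len(split_list[2]))
--         elif split_type == '25%' and len(hosts_list) > 3:
--             split_list = [hosts_list[i::4] for i in range(4)]
--             possibilities['25%'] = '{0} | Group1 : {1} | Group2 : {2} | Group3 : {3} | Group4 : {4}'.format(msg, len(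
--                 split_list[0]), len(split_list[1]), len(split_list[2]), len(split_list[3]))
--         elif split_type == '50%' and len(hosts_list) >= 2:
--             split_list = [hosts_list[i::2] for i in range(2)]
--             possibilities['50%'] = '{0} | Group1 : {1} | Group2 : {2}'.format(msg, len(split_list[0]),
--                                                                               len(split_list[1]))
--     if not possibilities:
--         possibilities = {'None': 'Not Supported because at least two instances must be running for this application'}
--     return possibilities
-- ===== SOURCE B (Python) =====
-- def safe_deployment_possibilities(hosts_list):
--     """ Same result as A, computed in O(1) from len(hosts_list):
--         group sizes by ceiling division, 1by1 listing capped at 5 entries. """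
--     n = len(hosts_list)
--     msg = 'Number of instances per deployment group:'
--     if n < 2:
--         return {'None': 'Not Supported because at least two instances must be running for this application'}
--     ceil = lambda a, b: (a + b - 1) // b
--     body = ' | '.join('Group%d : 1' % i for i in range(1, min(n, 5) + 1))
--     out = {'1by1': '%s | %s%s ' % (msg, body, ' | ...' if n > 5 else '')}
--     if n > 2:
--         out['1/3'] = '%s | Group1 : %d | Group2 : %d | Group3 : %d' % (
--             msg, ceil(n, 3), ceil(n - 1, 3), ceil(n - 2, 3))
--     if n > 3:
--         out['25%'] = '%s | Group1 : %d | Group2 : %d | Group3 : %d | Group4 : %d' % (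
--             msg, ceil(n, 4), ceil(n - 1, 4), ceil(n - 2, 4), ceil(n - 3, 4))
--     out['50%'] = '%s | Group1 : %d | Group2 : %d' % (msg, ceil(n, 2), ceil(n - 1, 2))
--     return out
-- ===== Notes on version B (the rewrite author's own statement) =====
-- stated objective: faster
-- what changed: B derives every group count directly from len(hosts_list) by ceiling division and builds at most 5 '1by1' labels, instead of enumerating all hosts and materialising the stride slices hosts_list[i::k]; the whole dict is built in O(1).
import Mathlib
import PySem

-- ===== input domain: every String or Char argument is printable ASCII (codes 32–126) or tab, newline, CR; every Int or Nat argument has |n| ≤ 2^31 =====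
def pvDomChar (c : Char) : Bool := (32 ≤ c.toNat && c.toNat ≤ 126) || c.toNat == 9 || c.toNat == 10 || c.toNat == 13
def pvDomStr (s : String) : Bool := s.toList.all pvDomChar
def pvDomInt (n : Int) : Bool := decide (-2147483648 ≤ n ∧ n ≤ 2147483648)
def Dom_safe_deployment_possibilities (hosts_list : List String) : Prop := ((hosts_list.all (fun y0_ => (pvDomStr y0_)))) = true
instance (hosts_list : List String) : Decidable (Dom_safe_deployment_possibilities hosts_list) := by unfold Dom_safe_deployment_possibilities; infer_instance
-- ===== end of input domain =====

-- B computes every group count in O(1) by ceiling division on len(hosts_list) instead of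
-- materialising slices/per-host lists; Python dicts are rendered as insertion-ordered assoc lists.

-- ===== PORT A =====
def safe_deployment_possibilities (hosts_list : List String) : List (String × String) :=
  let split_types : List String := ["1by1", "1/3", "25%", "50%"]
  let msg : String := "Number of instances per deployment group:"
  let possibilities : PySem.Dict String String :=
    split_types.foldl (fun possibilities split_type =>
      if split_type = "1by1" ∧ hosts_list.length > 1 then
        let groups_one : List String :=
          (PySem.List.enumerate hosts_list).map
            (fun i => "Group" ++ PySem.Int.toStr (i.1 + 1) ++ " : 1 |")
        let groups_one :=
          if groups_one.length > 5 then
            PySem.List.slice groups_one (some 0) (some 5) ++ ["....."]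
          else groups_one
        possibilities.insert "1by1"
          (msg ++ " | " ++ PySem.Str.slice (PySem.Str.join " " groups_one) none (some (-2)) ++ " ")
      else if split_type = "1/3" ∧ hosts_list.length > 2 then
        let split_list : List (List String) :=
          (PySem.List.pyRange 0 3 1).map
            (fun i => (PySem.List.slice? hosts_list (some i) none 3).getD [])
        possibilities.insert "1/3"
          (msg ++ " | Group1 : " ++ PySem.Int.toStr ((PySem.List.pyGetD split_list 0 []).length)
               ++ " | Group2 : " ++ PySem.Int.toStr ((PySem.List.pyGetD split_list 1 []).length)
               ++ " | Group3 : " ++ PySem.Int.toStr ((PySem.List.pyGetD split_list 2 []).length))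
      else if split_type = "25%" ∧ hosts_list.length > 3 then
        let split_list : List (List String) :=
          (PySem.List.pyRange 0 4 1).map
            (fun i => (PySem.List.slice? hosts_list (some i) none 4).getD [])
        possibilities.insert "25%"
          (msg ++ " | Group1 : " ++ PySem.Int.toStr ((PySem.List.pyGetD split_list 0 []).length)
               ++ " | Group2 : " ++ PySem.Int.toStr ((PySem.List.pyGetD split_list 1 []).length)
               ++ " | Group3 : " ++ PySem.Int.toStr ((PySem.List.pyGetD split_list 2 []).length)
               ++ " | Group4 : " ++ PySem.Int.toStr ((PySem.List.pyGetD split_list 3 []).length))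
      else if split_type = "50%" ∧ hosts_list.length ≥ 2 then
        let split_list : List (List String) :=
          (PySem.List.pyRange 0 2 1).map
            (fun i => (PySem.List.slice? hosts_list (some i) none 2).getD [])
        possibilities.insert "50%"
          (msg ++ " | Group1 : " ++ PySem.Int.toStr ((PySem.List.pyGetD split_list 0 []).length)
               ++ " | Group2 : " ++ PySem.Int.toStr ((PySem.List.pyGetD split_list 1 []).length))
      else possibilities) PySem.Dict.empty
  if possibilities.items = [] then
    [("None", "Not Supported because at least two instances must be running for this application")]
  else possibilities.items

-- ===== PORT B =====
-- ceil(a, b) from Source B: (a + b - 1) // b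
def pvCeilDiv (a b : Int) : Int := PySem.Int.floordiv (a + b - 1) b

def safe_deployment_possibilities_alt (hosts_list : List String) : List (String × String) :=
  let n : Int := hosts_list.length
  let msg : String := "Number of instances per deployment group:"
  if n < 2 then
    [("None", "Not Supported because at least two instances must be running for this application")]
  else
    let body : String := PySem.Str.join " | "
      ((PySem.List.pyRange 1 (min n 5 + 1) 1).map
        (fun i => "Group" ++ PySem.Int.toStr i ++ " : 1"))
    let out : List (String × String) :=
      [("1by1", msg ++ " | " ++ body ++ (if n > 5 then " | ..." else "") ++ " ")]
    let out := if n > 2 then out ++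
      [("1/3", msg ++ " | Group1 : " ++ PySem.Int.toStr (pvCeilDiv n 3)
                   ++ " | Group2 : " ++ PySem.Int.toStr (pvCeilDiv (n - 1) 3)
                   ++ " | Group3 : " ++ PySem.Int.toStr (pvCeilDiv (n - 2) 3))] else out
    let out := if n > 3 then out ++
      [("25%", msg ++ " | Group1 : " ++ PySem.Int.toStr (pvCeilDiv n 4)
                   ++ " | Group2 : " ++ PySem.Int.toStr (pvCeilDiv (n - 1) 4)
                   ++ " | Group3 : " ++ PySem.Int.toStr (pvCeilDiv (n - 2) 4)
                   ++ " | Group4 : " ++ PySem.Int.toStr (pvCeilDiv (n - 3) 4))] else out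
    out ++ [("50%", msg ++ " | Group1 : " ++ PySem.Int.toStr (pvCeilDiv n 2)
                        ++ " | Group2 : " ++ PySem.Int.toStr (pvCeilDiv (n - 1) 2))]

-- ===== PRECONDITION & SPEC =====
def Spec_safe_deployment_possibilities (hosts_list : List String) (out : List (String × String)) : Prop := out = safe_deployment_possibilities_alt hosts_list
instance (hosts_list : List String) (out : List (String × String)) : Decidable (Spec_safe_deployment_possibilities hosts_list out) := by unfold Spec_safe_deployment_possibilities; infer_instance

-- ===== CLAIM (what is proved, stated in full; the proofs are below) =====
def Claim_equal_safe_deployment_possibilities : Prop := ∀ (hosts_list : List String), Dom_safe_deployment_possibilities hosts_list → Spec_safe_deployment_possibilities hosts_list (safe_deployment_possibilities hosts_list)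

-- ===== LEMMAS AND PROOFS =====
theorem pv_ne_1 : ("1by1" : String) ≠ "1/3" := by decide
theorem pv_ne_2 : ("1by1" : String) ≠ "25%" := by decide
theorem pv_ne_3 : ("1by1" : String) ≠ "50%" := by decide
theorem pv_ne_4 : ("1/3" : String) ≠ "1by1" := by decide
theorem pv_ne_5 : ("1/3" : String) ≠ "25%" := by decide
theorem pv_ne_6 : ("1/3" : String) ≠ "50%" := by decide
theorem pv_ne_7 : ("25%" : String) ≠ "1by1" := by decide
theorem pv_ne_8 : ("25%" : String) ≠ "1/3" := by decide
theorem pv_ne_9 : ("25%" : String) ≠ "50%" := by decide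
theorem pv_ne_10 : ("50%" : String) ≠ "1by1" := by decide
theorem pv_ne_11 : ("50%" : String) ≠ "1/3" := by decide
theorem pv_ne_12 : ("50%" : String) ≠ "25%" := by decide

theorem pv_g30 : ∀ (a b c : List String), PySem.List.pyGetD [a,b,c] 0 [] = a := fun a b c => by simp [PySem.List.pyGetD, PySem.List.pyGet?, PySem.List.pyIdx?]
theorem pv_g31 : ∀ (a b c : List String), PySem.List.pyGetD [a,b,c] 1 [] = b := fun a b c => by simp [PySem.List.pyGetD, PySem.List.pyGet?, PySem.List.pyIdx?]
theorem pv_g32 : ∀ (a b c : List String), PySem.List.pyGetD [a,b,c] 2 [] = c := fun a b c => by simp [PySem.List.pyGetD, PySem.List.pyGet?, PySem.List.pyIdx?]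
theorem pv_g40 : ∀ (a b c d : List String), PySem.List.pyGetD [a,b,c,d] 0 [] = a := fun a b c d => by simp [PySem.List.pyGetD, PySem.List.pyGet?, PySem.List.pyIdx?]
theorem pv_g41 : ∀ (a b c d : List String), PySem.List.pyGetD [a,b,c,d] 1 [] = b := fun a b c d => by simp [PySem.List.pyGetD, PySem.List.pyGet?, PySem.List.pyIdx?]
theorem pv_g42 : ∀ (a b c d : List String), PySem.List.pyGetD [a,b,c,d] 2 [] = c := fun a b c d => by simp [PySem.List.pyGetD, PySem.List.pyGet?, PySem.List.pyIdx?]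
theorem pv_g43 : ∀ (a b c d : List String), PySem.List.pyGetD [a,b,c,d] 3 [] = d := fun a b c d => by simp [PySem.List.pyGetD, PySem.List.pyGet?, PySem.List.pyIdx?]
theorem pv_g20 : ∀ (a b : List String), PySem.List.pyGetD [a,b] 0 [] = a := fun a b => by simp [PySem.List.pyGetD, PySem.List.pyGet?, PySem.List.pyIdx?]
theorem pv_g21 : ∀ (a b : List String), PySem.List.pyGetD [a,b] 1 [] = b := fun a b => by simp [PySem.List.pyGetD, PySem.List.pyGet?, PySem.List.pyIdx?]

theorem pv_enum_map (xs : List String) (F : Int → String) :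
    (PySem.List.enumerate xs).map (fun p => F p.1)
      = (PySem.List.pyRange 0 (xs.length) 1).map F := by
  rw [show (fun p : Int × String => F p.1) = F ∘ (fun p : Int × String => p.1) from rfl,
      ← List.map_map, PySem.List.map_fst_enumerate]
  norm_num

theorem pv_len_slice_step (xs : List String) (i k : Nat) (hi : i ≤ xs.length) (hk : 0 < k) :
    ((PySem.List.slice? xs (some (i : Int)) none (k : Int)).getD []).length
      = (xs.length - i + k - 1) / k := by
  have hk' : ((k : Int)) ≠ 0 := by exact_mod_cast hk.ne'
  have hknlt : ¬ ((k : Int) < 0) := by omega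
  have hilt : ¬ ((i : Int) < 0) := by omega
  have hmin : min (i : Int) (xs.length : Int) = (i : Int) := by omega
  simp only [PySem.List.slice?, PySem.List.sliceIndices, if_neg hk', if_neg hknlt, if_neg hilt,
    hmin, if_pos (by exact_mod_cast hk : (0:Int) < (k:Int))]
  rcases Nat.lt_or_ge i xs.length with hlt | hge
  · rw [if_pos (by exact_mod_cast hlt)]
    have hcast : (((xs.length : Int) - i + k - 1) / k).toNat = (xs.length - i + k - 1) / k := by
      have h : ((xs.length : Int) - i + k - 1) = ((xs.length - i + k - 1 : Nat) : Int) := by omega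
      rw [h]; rfl
    rw [hcast, Option.getD_some, List.filterMap_length_eq_length.mpr, List.length_range]
    intro a ha
    rw [List.mem_range] at ha
    have hc : (a + 1) * k ≤ xs.length - i + k - 1 :=
      (Nat.le_div_iff_mul_le hk).mp ha
    rw [Nat.succ_mul] at hc
    have hlen : i + k * a < xs.length := by
      rw [Nat.mul_comm k a]
      generalize a * k = t at hc ⊢
      omega
    rw [show ((i : Int) + (k : Int) * (a : Nat)).toNat = i + k * a from by omega]
    simp [List.getElem?_eq_getElem hlen]
  · rw [if_neg (by exact_mod_cast Nat.not_lt.mpr hge)]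
    have hieq : i = xs.length := le_antisymm hi hge
    subst hieq
    exact (Nat.div_eq_of_lt (by omega)).symm

theorem pv_ceil (a ki : Int) (k c : Nat) (hk : 0 < k) (hki : ki = (k : Int))
    (hac : a + ki - 1 = ((c : Nat) : Int)) :
    pvCeilDiv a ki = ((c / k : Nat) : Int) := by
  unfold pvCeilDiv
  rw [hki] at hac ⊢
  rw [PySem.Int.floordiv_eq_ediv_of_pos (by exact_mod_cast hk), hac]
  exact Int.ofNat_ediv_ofNat

theorem pv_take5 (L : Nat) (h : 5 ≤ L) (f : Int → String) :
    PySem.List.slice ((PySem.List.pyRange 0 (L : Int) 1).map f) (some 0) (some 5)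
      = (PySem.List.pyRange 0 5 1).map f := by
  rw [PySem.List.slice_zero_start, PySem.List.slice_to _ (by norm_num)]
  rw [← List.map_take]
  congr 1
  rw [PySem.List.pyRange_one_append 0 5 L (by norm_num) (by exact_mod_cast h)]
  rw [List.take_append_of_le_length (by simp [PySem.List.length_pyRange_one])]
  exact List.take_of_length_le (by simp [PySem.List.length_pyRange_one])

theorem pv_items (v1 v2 v3 v4 : String) :
    ((((PySem.Dict.empty.insert "1by1" v1).insert "1/3" v2).insert "25%" v3).insert "50%" v4).items
      = [("1by1", v1), ("1/3", v2), ("25%", v3), ("50%", v4)] := rfl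

set_option maxHeartbeats 2000000 in
theorem pv_main5 (xs : List String) (h5 : 5 < xs.length) :
    safe_deployment_possibilities xs = safe_deployment_possibilities_alt xs := by
  have e1 : ("1/3" : String) ≠ "1by1" := by decide
  have e2 : ("25%" : String) ≠ "1by1" := by decide
  have e3 : ("25%" : String) ≠ "1/3" := by decide
  have e4 : ("50%" : String) ≠ "1by1" := by decide
  have e5 : ("50%" : String) ≠ "1/3" := by decide
  have e6 : ("50%" : String) ≠ "25%" := by decide
  have h1 : xs.length > 1 := by omega
  have h2 : xs.length > 2 := by omega
  have h3 : xs.length > 3 := by omega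
  have h4 : xs.length ≥ 2 := by omega
  have hEnum := pv_enum_map xs (fun a => "Group" ++ PySem.Int.toStr (a + 1) ++ " : 1 |")
  have hB2 : ¬ ((xs.length : Int) < 2) := by omega
  have hB5 : (5 : Int) < (xs.length : Int) := by omega
  have hI2 : (2 : Int) < (xs.length : Int) := by omega
  have hI3 : (3 : Int) < (xs.length : Int) := by omega
  have hmin : min ((xs.length : Int)) 5 = 5 := by omega
  have hgt : 5 < (List.map (fun a => "Group" ++ PySem.Int.toStr (a + 1) ++ " : 1 |") (PySem.List.pyRange 0 (xs.length : Int) 1)).length := by simp [PySem.List.length_pyRange_one]; omega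
  have s03 := pv_len_slice_step xs 0 3 (by omega) (by omega)
  have s13 := pv_len_slice_step xs 1 3 (by omega) (by omega)
  have s23 := pv_len_slice_step xs 2 3 (by omega) (by omega)
  have s04 := pv_len_slice_step xs 0 4 (by omega) (by omega)
  have s14 := pv_len_slice_step xs 1 4 (by omega) (by omega)
  have s24 := pv_len_slice_step xs 2 4 (by omega) (by omega)
  have s34 := pv_len_slice_step xs 3 4 (by omega) (by omega)
  have s02 := pv_len_slice_step xs 0 2 (by omega) (by omega)
  have s12 := pv_len_slice_step xs 1 2 (by omega) (by omega)
  norm_num at s03 s13 s23 s04 s14 s24 s34 s02 s12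
  have c03 := pv_ceil (xs.length : Int) (3:Int) 3 (xs.length + 2) (by omega) (by norm_num) (by omega)
  have c13 := pv_ceil ((xs.length : Int) - 1) (3:Int) 3 (xs.length - 1 + 2) (by omega) (by norm_num) (by omega)
  have c23 := pv_ceil ((xs.length : Int) - 2) (3:Int) 3 (xs.length - 2 + 2) (by omega) (by norm_num) (by omega)
  have c04 := pv_ceil (xs.length : Int) (4:Int) 4 (xs.length + 3) (by omega) (by norm_num) (by omega)
  have c14 := pv_ceil ((xs.length : Int) - 1) (4:Int) 4 (xs.length - 1 + 3) (by omega) (by norm_num) (by omega)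
  have c24 := pv_ceil ((xs.length : Int) - 2) (4:Int) 4 (xs.length - 2 + 3) (by omega) (by norm_num) (by omega)
  have c34 := pv_ceil ((xs.length : Int) - 3) (4:Int) 4 (xs.length - 3 + 3) (by omega) (by norm_num) (by omega)
  have c02 := pv_ceil (xs.length : Int) (2:Int) 2 (xs.length + 1) (by omega) (by norm_num) (by omega)
  have c12 := pv_ceil ((xs.length : Int) - 1) (2:Int) 2 (xs.length - 1 + 1) (by omega) (by norm_num) (by omega)
  have hL : (List.map (fun i : Int × String => "Group" ++ PySem.Int.toStr (i.1 + 1) ++ " : 1 |") (PySem.List.enumerate xs)).length = xs.length := by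
    simp [PySem.List.length_enumerate]
  have g30 : ∀ (a b c : List String), PySem.List.pyGetD [a,b,c] 0 [] = a := fun a b c => by simp [PySem.List.pyGetD, PySem.List.pyGet?, PySem.List.pyIdx?]
  have g31 : ∀ (a b c : List String), PySem.List.pyGetD [a,b,c] 1 [] = b := fun a b c => by simp [PySem.List.pyGetD, PySem.List.pyGet?, PySem.List.pyIdx?]
  have g32 : ∀ (a b c : List String), PySem.List.pyGetD [a,b,c] 2 [] = c := fun a b c => by simp [PySem.List.pyGetD, PySem.List.pyGet?, PySem.List.pyIdx?]
  have g40 : ∀ (a b c d : List String), PySem.List.pyGetD [a,b,c,d] 0 [] = a := fun a b c d => by simp [PySem.List.pyGetD, PySem.List.pyGet?, PySem.List.pyIdx?]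
  have g41 : ∀ (a b c d : List String), PySem.List.pyGetD [a,b,c,d] 1 [] = b := fun a b c d => by simp [PySem.List.pyGetD, PySem.List.pyGet?, PySem.List.pyIdx?]
  have g42 : ∀ (a b c d : List String), PySem.List.pyGetD [a,b,c,d] 2 [] = c := fun a b c d => by simp [PySem.List.pyGetD, PySem.List.pyGet?, PySem.List.pyIdx?]
  have g43 : ∀ (a b c d : List String), PySem.List.pyGetD [a,b,c,d] 3 [] = d := fun a b c d => by simp [PySem.List.pyGetD, PySem.List.pyGet?, PySem.List.pyIdx?]
  have g20 : ∀ (a b : List String), PySem.List.pyGetD [a,b] 0 [] = a := fun a b => by simp [PySem.List.pyGetD, PySem.List.pyGet?, PySem.List.pyIdx?]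
  have g21 : ∀ (a b : List String), PySem.List.pyGetD [a,b] 1 [] = b := fun a b => by simp [PySem.List.pyGetD, PySem.List.pyGet?, PySem.List.pyIdx?]
  simp only [safe_deployment_possibilities, safe_deployment_possibilities_alt,
    List.foldl_cons, List.foldl_nil, e1, e2, e3, e4, e5, e6, h1, h2, h3, h4,
    if_true, if_false, false_and, and_true, true_and, and_self, gt_iff_lt, h5, hL,
    hEnum, hB2, hB5, hI2, hI3, hmin, hgt,
    show PySem.List.pyRange 0 3 1 = [0,1,2] from by decide,
    show PySem.List.pyRange 0 4 1 = [0,1,2,3] from by decide,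
    show PySem.List.pyRange 0 2 1 = [0,1] from by decide,
    List.map_cons, List.map_nil,
    g30, g31, g32, g40, g41, g42, g43, g20, g21,
    s03, s13, s23, s04, s14, s24, s34, s02, s12,
    c03, c13, c23, c04, c14, c24, c34, c02, c12,
    pv_take5 xs.length (by omega)]
  rw [pv_items, if_neg (by simp)]
  simp only [List.singleton_append, List.cons_append, List.nil_append]
  congr 1

theorem pv_main_small (xs : List String) (hlo : 2 ≤ xs.length) (hhi : xs.length ≤ 5) :
    safe_deployment_possibilities xs = safe_deployment_possibilities_alt xs := by
  have hx : xs.length = 2 ∨ xs.length = 3 ∨ xs.length = 4 ∨ xs.length = 5 := by omega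
  rcases hx with hn | hn | hn | hn
  · have h1 : xs.length > 1 := by omega
    have h4 : xs.length ≥ 2 := by omega
    have hA2 : ¬ xs.length > 2 := by omega
    have hA3 : ¬ xs.length > 3 := by omega
    have hBc2 : ¬ ((2:Int) < (xs.length : Int)) := by omega
    have hBc3 : ¬ ((3:Int) < (xs.length : Int)) := by omega
    have hB2 : ¬ ((xs.length : Int) < 2) := by omega
    have hB5 : ¬ ((5:Int) < (xs.length : Int)) := by omega
    have hngt : ¬ 5 < (List.map (fun a => "Group" ++ PySem.Int.toStr (a + 1) ++ " : 1 |") (PySem.List.pyRange 0 (xs.length : Int) 1)).length := by simp [PySem.List.length_pyRange_one]; omega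
    have hEnum := pv_enum_map xs (fun a => "Group" ++ PySem.Int.toStr (a + 1) ++ " : 1 |")
    have hL : (List.map (fun i : Int × String => "Group" ++ PySem.Int.toStr (i.1 + 1) ++ " : 1 |") (PySem.List.enumerate xs)).length = xs.length := by simp [PySem.List.length_enumerate]
    have s02 := pv_len_slice_step xs 0 2 (by omega) (by omega)
    have s12 := pv_len_slice_step xs 1 2 (by omega) (by omega)
    norm_num at s02 s12
    simp only [safe_deployment_possibilities, safe_deployment_possibilities_alt,
    List.foldl_cons, List.foldl_nil, pv_ne_1, pv_ne_2, pv_ne_3, pv_ne_4, pv_ne_5, pv_ne_6,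
    pv_ne_7, pv_ne_8, pv_ne_9, pv_ne_10, pv_ne_11, pv_ne_12,
    h1, h4, hA2, hA3, hB2, hB5, hBc2, hBc3, hngt, hL, hEnum,
    if_true, if_false, false_and, and_false, and_true, true_and, and_self, gt_iff_lt,
    show PySem.List.pyRange 0 3 1 = [0,1,2] from by decide,
    show PySem.List.pyRange 0 4 1 = [0,1,2,3] from by decide,
    show PySem.List.pyRange 0 2 1 = [0,1] from by decide,
    List.map_cons, List.map_nil,
    pv_g30, pv_g31, pv_g32, pv_g40, pv_g41, pv_g42, pv_g43, pv_g20, pv_g21,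
    s02, s12]
    rw [hn]
    decide
  · have h1 : xs.length > 1 := by omega
    have h4 : xs.length ≥ 2 := by omega
    have hA2 : xs.length > 2 := by omega
    have hA3 : ¬ xs.length > 3 := by omega
    have hBc2 : ((2:Int) < (xs.length : Int)) := by omega
    have hBc3 : ¬ ((3:Int) < (xs.length : Int)) := by omega
    have hB2 : ¬ ((xs.length : Int) < 2) := by omega
    have hB5 : ¬ ((5:Int) < (xs.length : Int)) := by omega
    have hngt : ¬ 5 < (List.map (fun a => "Group" ++ PySem.Int.toStr (a + 1) ++ " : 1 |") (PySem.List.pyRange 0 (xs.length : Int) 1)).length := by simp [PySem.List.length_pyRange_one]; omega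
    have hEnum := pv_enum_map xs (fun a => "Group" ++ PySem.Int.toStr (a + 1) ++ " : 1 |")
    have hL : (List.map (fun i : Int × String => "Group" ++ PySem.Int.toStr (i.1 + 1) ++ " : 1 |") (PySem.List.enumerate xs)).length = xs.length := by simp [PySem.List.length_enumerate]
    have s02 := pv_len_slice_step xs 0 2 (by omega) (by omega)
    have s12 := pv_len_slice_step xs 1 2 (by omega) (by omega)
    have s03 := pv_len_slice_step xs 0 3 (by omega) (by omega)
    have s13 := pv_len_slice_step xs 1 3 (by omega) (by omega)
    have s23 := pv_len_slice_step xs 2 3 (by omega) (by omega)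
    norm_num at s02 s12 s03 s13 s23
    simp only [safe_deployment_possibilities, safe_deployment_possibilities_alt,
    List.foldl_cons, List.foldl_nil, pv_ne_1, pv_ne_2, pv_ne_3, pv_ne_4, pv_ne_5, pv_ne_6,
    pv_ne_7, pv_ne_8, pv_ne_9, pv_ne_10, pv_ne_11, pv_ne_12,
    h1, h4, hA2, hA3, hB2, hB5, hBc2, hBc3, hngt, hL, hEnum,
    if_true, if_false, false_and, and_false, and_true, true_and, and_self, gt_iff_lt,
    show PySem.List.pyRange 0 3 1 = [0,1,2] from by decide,
    show PySem.List.pyRange 0 4 1 = [0,1,2,3] from by decide,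
    show PySem.List.pyRange 0 2 1 = [0,1] from by decide,
    List.map_cons, List.map_nil,
    pv_g30, pv_g31, pv_g32, pv_g40, pv_g41, pv_g42, pv_g43, pv_g20, pv_g21,
    s02, s12, s03, s13, s23]
    rw [hn]
    decide
  · have h1 : xs.length > 1 := by omega
    have h4 : xs.length ≥ 2 := by omega
    have hA2 : xs.length > 2 := by omega
    have hA3 : xs.length > 3 := by omega
    have hBc2 : ((2:Int) < (xs.length : Int)) := by omega
    have hBc3 : ((3:Int) < (xs.length : Int)) := by omega
    have hB2 : ¬ ((xs.length : Int) < 2) := by omega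
    have hB5 : ¬ ((5:Int) < (xs.length : Int)) := by omega
    have hngt : ¬ 5 < (List.map (fun a => "Group" ++ PySem.Int.toStr (a + 1) ++ " : 1 |") (PySem.List.pyRange 0 (xs.length : Int) 1)).length := by simp [PySem.List.length_pyRange_one]; omega
    have hEnum := pv_enum_map xs (fun a => "Group" ++ PySem.Int.toStr (a + 1) ++ " : 1 |")
    have hL : (List.map (fun i : Int × String => "Group" ++ PySem.Int.toStr (i.1 + 1) ++ " : 1 |") (PySem.List.enumerate xs)).length = xs.length := by simp [PySem.List.length_enumerate]
    have s02 := pv_len_slice_step xs 0 2 (by omega) (by omega)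
    have s12 := pv_len_slice_step xs 1 2 (by omega) (by omega)
    have s03 := pv_len_slice_step xs 0 3 (by omega) (by omega)
    have s13 := pv_len_slice_step xs 1 3 (by omega) (by omega)
    have s23 := pv_len_slice_step xs 2 3 (by omega) (by omega)
    have s04 := pv_len_slice_step xs 0 4 (by omega) (by omega)
    have s14 := pv_len_slice_step xs 1 4 (by omega) (by omega)
    have s24 := pv_len_slice_step xs 2 4 (by omega) (by omega)
    have s34 := pv_len_slice_step xs 3 4 (by omega) (by omega)
    norm_num at s02 s12 s03 s13 s23 s04 s14 s24 s34
    simp only [safe_deployment_possibilities, safe_deployment_possibilities_alt,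
    List.foldl_cons, List.foldl_nil, pv_ne_1, pv_ne_2, pv_ne_3, pv_ne_4, pv_ne_5, pv_ne_6,
    pv_ne_7, pv_ne_8, pv_ne_9, pv_ne_10, pv_ne_11, pv_ne_12,
    h1, h4, hA2, hA3, hB2, hB5, hBc2, hBc3, hngt, hL, hEnum,
    if_true, if_false, false_and, and_false, and_true, true_and, and_self, gt_iff_lt,
    show PySem.List.pyRange 0 3 1 = [0,1,2] from by decide,
    show PySem.List.pyRange 0 4 1 = [0,1,2,3] from by decide,
    show PySem.List.pyRange 0 2 1 = [0,1] from by decide,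
    List.map_cons, List.map_nil,
    pv_g30, pv_g31, pv_g32, pv_g40, pv_g41, pv_g42, pv_g43, pv_g20, pv_g21,
    s02, s12, s03, s13, s23, s04, s14, s24, s34]
    rw [hn]
    decide
  · have h1 : xs.length > 1 := by omega
    have h4 : xs.length ≥ 2 := by omega
    have hA2 : xs.length > 2 := by omega
    have hA3 : xs.length > 3 := by omega
    have hBc2 : ((2:Int) < (xs.length : Int)) := by omega
    have hBc3 : ((3:Int) < (xs.length : Int)) := by omega
    have hB2 : ¬ ((xs.length : Int) < 2) := by omega
    have hB5 : ¬ ((5:Int) < (xs.length : Int)) := by omega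
    have hngt : ¬ 5 < (List.map (fun a => "Group" ++ PySem.Int.toStr (a + 1) ++ " : 1 |") (PySem.List.pyRange 0 (xs.length : Int) 1)).length := by simp [PySem.List.length_pyRange_one]; omega
    have hEnum := pv_enum_map xs (fun a => "Group" ++ PySem.Int.toStr (a + 1) ++ " : 1 |")
    have hL : (List.map (fun i : Int × String => "Group" ++ PySem.Int.toStr (i.1 + 1) ++ " : 1 |") (PySem.List.enumerate xs)).length = xs.length := by simp [PySem.List.length_enumerate]
    have s02 := pv_len_slice_step xs 0 2 (by omega) (by omega)
    have s12 := pv_len_slice_step xs 1 2 (by omega) (by omega)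
    have s03 := pv_len_slice_step xs 0 3 (by omega) (by omega)
    have s13 := pv_len_slice_step xs 1 3 (by omega) (by omega)
    have s23 := pv_len_slice_step xs 2 3 (by omega) (by omega)
    have s04 := pv_len_slice_step xs 0 4 (by omega) (by omega)
    have s14 := pv_len_slice_step xs 1 4 (by omega) (by omega)
    have s24 := pv_len_slice_step xs 2 4 (by omega) (by omega)
    have s34 := pv_len_slice_step xs 3 4 (by omega) (by omega)
    norm_num at s02 s12 s03 s13 s23 s04 s14 s24 s34
    simp only [safe_deployment_possibilities, safe_deployment_possibilities_alt,
    List.foldl_cons, List.foldl_nil, pv_ne_1, pv_ne_2, pv_ne_3, pv_ne_4, pv_ne_5, pv_ne_6,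
    pv_ne_7, pv_ne_8, pv_ne_9, pv_ne_10, pv_ne_11, pv_ne_12,
    h1, h4, hA2, hA3, hB2, hB5, hBc2, hBc3, hngt, hL, hEnum,
    if_true, if_false, false_and, and_false, and_true, true_and, and_self, gt_iff_lt,
    show PySem.List.pyRange 0 3 1 = [0,1,2] from by decide,
    show PySem.List.pyRange 0 4 1 = [0,1,2,3] from by decide,
    show PySem.List.pyRange 0 2 1 = [0,1] from by decide,
    List.map_cons, List.map_nil,
    pv_g30, pv_g31, pv_g32, pv_g40, pv_g41, pv_g42, pv_g43, pv_g20, pv_g21,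
    s02, s12, s03, s13, s23, s04, s14, s24, s34]
    rw [hn]
    decide

theorem pv_main (xs : List String) :
    safe_deployment_possibilities xs = safe_deployment_possibilities_alt xs := by
  rcases Nat.lt_or_ge xs.length 2 with h | h
  · have hA1 : ¬ xs.length > 1 := by omega
    have hA2 : ¬ xs.length > 2 := by omega
    have hA3 : ¬ xs.length > 3 := by omega
    have hA4 : ¬ xs.length ≥ 2 := by omega
    have hB2 : ((xs.length : Int) < 2) := by omega
    simp only [safe_deployment_possibilities, safe_deployment_possibilities_alt,
      List.foldl_cons, List.foldl_nil, pv_ne_1, pv_ne_2, pv_ne_3, pv_ne_4, pv_ne_5, pv_ne_6,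
      pv_ne_7, pv_ne_8, pv_ne_9, pv_ne_10, pv_ne_11, pv_ne_12,
      hA1, hA2, hA3, hA4, hB2,
      if_true, if_false, false_and, and_false, and_true, true_and,
      show (PySem.Dict.empty : PySem.Dict String String).items = [] from rfl]
  · rcases Nat.lt_or_ge 5 xs.length with h5 | h5
    · exact pv_main5 xs h5
    · exact pv_main_small xs h (by omega)

-- ===== VERDICT (by name: the statement is the Claim_ definition above) =====
theorem safe_deployment_possibilities_spec : Claim_equal_safe_deployment_possibilities := by
  intro xs _
  exact pv_main xs
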